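-- pv_equiv track=rewrite | github.com/NaamaMika/boss-sniffer | step2_manager.py | update_ip
-- ===== SOURCE A (Python) =====
-- def update_ip(update_html_code, dt_ip, indexs):
--     """ Update the ip traffic in the html code
--     :param update_html_code: html code
--     :param dt_ip: dict [ip]:[traffic]
--     :param indexs: two indexs that will help set the html code and update it
--     :return: updates html code
--     """
--     updated_list = []
--     index_keys = indexs["ips"][0]
--     index_values = indexs["ips"][1]
--     ips = list(dt_ip.keys())
--     traffic = list(dt_ip.values())
--     for i in range(len(update_html_code)):
--         if i == index_keys:
--             index = update_html_code[i].find(":") + 1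
--             k = update_html_code[i][0:index]
--             k += " " + str(ips).replace("""\"""", '')
--             k += ","
--             updated_list.append(k)
--         elif i == index_values:
--             index = update_html_code[i].find(":") + 1
--             q = update_html_code[i][0:index]
--             q += str(traffic)
--             q += ","
--             updated_list.append(q)
--         else:
--             updated_list.append(update_html_code[i])
--     return updated_list
-- ===== SOURCE B (Python) =====
-- def update_ip(update_html_code, dt_ip, indexs):
--     """Rebuild by concatenating the untouched slices around patched lines (patch-list approach)."""
--     index_keys = indexs["ips"][0]
--     index_values = indexs["ips"][1]
--     n = len(update_html_code)
--     patches = {}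
--     if 0 <= index_values < n:
--         line = update_html_code[index_values]
--         patches[index_values] = line[:line.find(":") + 1] + str(list(dt_ip.values())) + ","
--     if 0 <= index_keys < n:
--         line = update_html_code[index_keys]
--         patches[index_keys] = line[:line.find(":") + 1] + " " + str(list(dt_ip.keys())).replace('"', '') + ","
--     out = []
--     prev = 0
--     for i in sorted(patches):
--         out += update_html_code[prev:i]
--         out.append(patches[i])
--         prev = i + 1
--     out += update_html_code[prev:]
--     return out
-- ===== Notes on version B (the rewrite author's own statement) =====
-- stated objective: alternative
-- what changed: B collects the (at most two) in-range replacement lines into a patch dict keyed by index and rebuilds the result by concatenating the untouched slices between the sorted patch positions, instead of A's per-element loop with an if/elif branch at every line.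
import Mathlib
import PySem

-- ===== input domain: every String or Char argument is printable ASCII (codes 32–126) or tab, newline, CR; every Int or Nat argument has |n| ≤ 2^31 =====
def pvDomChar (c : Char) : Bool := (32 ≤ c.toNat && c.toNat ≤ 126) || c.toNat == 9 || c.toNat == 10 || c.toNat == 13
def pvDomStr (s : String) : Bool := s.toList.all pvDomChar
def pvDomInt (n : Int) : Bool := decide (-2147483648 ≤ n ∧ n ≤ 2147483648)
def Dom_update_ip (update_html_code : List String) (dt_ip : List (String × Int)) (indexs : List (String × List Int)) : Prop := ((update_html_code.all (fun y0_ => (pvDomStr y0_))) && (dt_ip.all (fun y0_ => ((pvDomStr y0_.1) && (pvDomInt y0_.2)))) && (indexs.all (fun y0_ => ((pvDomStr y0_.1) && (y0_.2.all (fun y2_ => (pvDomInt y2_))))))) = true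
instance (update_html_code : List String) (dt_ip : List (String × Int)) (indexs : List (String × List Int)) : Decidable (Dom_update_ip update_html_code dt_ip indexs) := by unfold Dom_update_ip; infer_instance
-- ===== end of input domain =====

-- B collects the (at most two) in-range replacements into a patch dict and rebuilds the result by
-- concatenating the untouched slices around the patched lines, instead of A's per-element if/elif loop; objective: alternative.

-- Shared ports of Python BUILT-INS (repr of a printable-ASCII str, str(list)): both Pythons call str()/repr on the same values.
def pyReprStr (s : String) : String :=
  let cs := s.toList
  let q : Char := if cs.contains '\'' && !cs.contains '"' then '"' else '\''
  String.ofList (q :: (cs.flatMap (fun c =>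
    if c = '\\' then ['\\', '\\']
    else if c = '\n' then ['\\', 'n']
    else if c = '\r' then ['\\', 'r']
    else if c = '\t' then ['\\', 't']
    else if c = q then ['\\', q]
    else [c])) ++ [q])

def pyStrStrList (xs : List String) : String :=
  "[" ++ String.intercalate ", " (xs.map pyReprStr) ++ "]"

def pyStrIntList (xs : List Int) : String :=
  "[" ++ String.intercalate ", " (xs.map PySem.Int.toStr) ++ "]"

-- ===== PORT A =====
def update_ip (update_html_code : List String) (dt_ip : List (String × Int)) (indexs : List (String × List Int)) : List String :=
  match (PySem.Dict.ofList indexs).get? "ips" with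
  | none => []  -- KeyError: outside Pre_
  | some ipsIdx =>
    match PySem.List.pyGet? ipsIdx 0, PySem.List.pyGet? ipsIdx 1 with
    | some index_keys, some index_values =>
      let d := PySem.Dict.ofList dt_ip
      let ips := PySem.Dict.keys d
      let traffic := PySem.Dict.values d
      (PySem.List.pyRange 0 (update_html_code.length : Int) 1).foldl (fun updated_list i =>
        let s := PySem.List.pyGetD update_html_code i ""
        if i == index_keys then
          let index := PySem.Str.find s ":" + 1
          let k := String.ofList (PySem.List.slice s.toList (some 0) (some index))
          updated_list ++ [k ++ (" " ++ PySem.Str.replace (pyStrStrList ips) "\"" "") ++ ","]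
        else if i == index_values then
          let index := PySem.Str.find s ":" + 1
          let q := String.ofList (PySem.List.slice s.toList (some 0) (some index))
          updated_list ++ [q ++ pyStrIntList traffic ++ ","]
        else
          updated_list ++ [s]) []
    | _, _ => []  -- IndexError: outside Pre_

-- ===== PORT B =====
def lineHead (line : String) : String :=
  String.ofList (PySem.List.slice line.toList (some 0) (some (PySem.Str.find line ":" + 1)))

def update_ip_alt (update_html_code : List String) (dt_ip : List (String × Int)) (indexs : List (String × List Int)) : List String :=
  let ipsIdx := ((PySem.Dict.ofList indexs).get? "ips").getD []
  if 2 ≤ ipsIdx.length then  -- guard: indexs["ips"][0]/[1] would raise otherwise (outside Pre_)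
    let index_keys := ipsIdx.getD 0 0
    let index_values := ipsIdx.getD 1 0
    let n : Int := (update_html_code.length : Int)
    let patches : PySem.Dict Int String := PySem.Dict.empty
    let patches :=
      if 0 ≤ index_values ∧ index_values < n then
        PySem.Dict.insert patches index_values
          (lineHead (PySem.List.pyGetD update_html_code index_values "") ++ pyStrIntList (PySem.Dict.values (PySem.Dict.ofList dt_ip)) ++ ",")
      else patches
    let patches :=
      if 0 ≤ index_keys ∧ index_keys < n then
        PySem.Dict.insert patches index_keys
          (lineHead (PySem.List.pyGetD update_html_code index_keys "") ++ " " ++ PySem.Str.replace (pyStrStrList (PySem.Dict.keys (PySem.Dict.ofList dt_ip))) "\"" "" ++ ",")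
      else patches
    let fin := (PySem.List.sorted (PySem.Dict.keys patches) (fun y => y) false).foldl
      (fun (st : List String × Int) i =>
        (st.1 ++ PySem.List.slice update_html_code (some st.2) (some i) ++ [PySem.Dict.getD patches i ""], i + 1))
      ([], (0 : Int))
    fin.1 ++ PySem.List.slice update_html_code (some fin.2) none
  else []  -- KeyError / IndexError: outside Pre_

-- ===== PRECONDITION & SPEC =====
-- Pre_ excludes exactly the inputs where A raises: indexs must map "ips" to a list of length ≥ 2
-- (otherwise Python raises KeyError/IndexError at indexs["ips"][0]/[1]).
def Pre_update_ip (update_html_code : List String) (dt_ip : List (String × Int)) (indexs : List (String × List Int)) : Prop :=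
  2 ≤ (((PySem.Dict.ofList indexs).get? "ips").getD []).length
instance (update_html_code : List String) (dt_ip : List (String × Int)) (indexs : List (String × List Int)) : Decidable (Pre_update_ip update_html_code dt_ip indexs) := by unfold Pre_update_ip; infer_instance

def pvWitness_update_ip : List String × (List (String × Int)) × (List (String × List Int)) :=
  (["a: x,", "b: y,"], [("1.2.3.4", 7)], [("ips", [0, 1])])

def Spec_update_ip (update_html_code : List String) (dt_ip : List (String × Int)) (indexs : List (String × List Int)) (out : List String) : Prop := out = update_ip_alt update_html_code dt_ip indexs
instance (update_html_code : List String) (dt_ip : List (String × Int)) (indexs : List (String × List Int)) (out : List String) : Decidable (Spec_update_ip update_html_code dt_ip indexs out) := by unfold Spec_update_ip; infer_instance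

-- ===== CLAIM (what is proved, stated in full; the proofs are below) =====
def Claim_equal_update_ip : Prop := ∀ (update_html_code : List String) (dt_ip : List (String × Int)) (indexs : List (String × List Int)), Dom_update_ip update_html_code dt_ip indexs → Pre_update_ip update_html_code dt_ip indexs → Spec_update_ip update_html_code dt_ip indexs (update_ip update_html_code dt_ip indexs)

-- ===== LEMMAS AND PROOFS =====

-- The common target of both proofs: the input list with the two guarded writes
-- (keys write last, so it wins when the two indices coincide, like A's if/elif and like B's dict overwrite).
def patchTarget (xs : List String) (ik iv : Int) (K V : String → String) : List String :=
  if 0 ≤ ik ∧ ik < (xs.length : Int) then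
    (if 0 ≤ iv ∧ iv < (xs.length : Int) then xs.set iv.toNat (V (PySem.List.pyGetD xs iv "")) else xs).set
      ik.toNat (K (PySem.List.pyGetD xs ik ""))
  else if 0 ≤ iv ∧ iv < (xs.length : Int) then xs.set iv.toNat (V (PySem.List.pyGetD xs iv "")) else xs

-- A's branch body mapped over all indices equals the two guarded writes.
theorem rebuild_eq (xs : List String) (ik iv : Int) (K V : String → String) :
    (List.range xs.length).map (fun (j : Nat) =>
      let s := PySem.List.pyGetD xs ((j : Nat) : Int) ""
      if ((j : Nat) : Int) == ik then K s else if ((j : Nat) : Int) == iv then V s else s)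
    = patchTarget xs ik iv K V := by
  unfold patchTarget
  apply List.ext_getElem?
  intro j
  rw [List.getElem?_map]
  by_cases hj : j < xs.length
  · rw [List.getElem?_range hj]
    by_cases hk : ((j : Nat) : Int) = ik
    · subst hk
      rw [if_pos ⟨by omega, by exact_mod_cast hj⟩, List.getElem?_set]
      simp [hj]
      split_ifs <;> simp [hj]
    · have hbk : (((j : Nat) : Int) == ik) = false := beq_eq_false_iff_ne.mpr hk
      by_cases hv : ((j : Nat) : Int) = iv
      · subst hv
        have hvg : 0 ≤ ((j : Nat) : Int) ∧ ((j : Nat) : Int) < (xs.length : Int) :=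
          ⟨by omega, by exact_mod_cast hj⟩
        split_ifs with hkg
        · rw [List.getElem?_set, if_neg (by omega), List.getElem?_set]
          simp [hj, hk]
        · rw [List.getElem?_set]
          simp [hj, hk]
      · have hbv : (((j : Nat) : Int) == iv) = false := beq_eq_false_iff_ne.mpr hv
        have hrhs : ∀ (l : List String), l = xs →
            ((if 0 ≤ ik ∧ ik < (xs.length : Int) then
                (if 0 ≤ iv ∧ iv < (xs.length : Int) then xs.set iv.toNat (V (PySem.List.pyGetD xs iv "")) else xs).set ik.toNat (K (PySem.List.pyGetD xs ik ""))
              else if 0 ≤ iv ∧ iv < (xs.length : Int) then xs.set iv.toNat (V (PySem.List.pyGetD xs iv "")) else xs))[j]? = xs[j]? := by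
          intro l _
          split_ifs with h1 h2 h2
          · rw [List.getElem?_set, if_neg (by omega), List.getElem?_set, if_neg (by omega)]
          · rw [List.getElem?_set, if_neg (by omega)]
          · rw [List.getElem?_set, if_neg (by omega)]
          · rfl
        rw [hrhs xs rfl]
        simp [hk, hv, List.getElem?_eq_getElem hj]
  · have hjr : (List.range xs.length)[j]? = none := by
      simp; omega
    rw [hjr]
    have : ∀ (l : List String), l.length = xs.length → l[j]? = none := by
      intro l hl
      simp [hl]; omega
    split_ifs with h1 h2 h2 <;> simp only [Option.map_none]
    · exact (this _ (by simp)).symm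
    · exact (this _ (by simp)).symm
    · exact (this _ (by simp)).symm
    · exact (this _ rfl).symm

-- One patched line: prefix slice ++ patch ++ suffix slice IS the indexed write.
theorem patch_one {α : Type} (xs : List α) (a : Int) (p : α) (h0 : 0 ≤ a) (h1 : a < (xs.length : Int)) :
    PySem.List.slice xs (some 0) (some a) ++ p :: PySem.List.slice xs (some (a + 1)) none
      = xs.set a.toNat p := by
  rw [PySem.List.slice_toNat xs le_rfl h0, PySem.List.slice_from xs (by omega),
    List.set_eq_take_cons_drop p (by omega)]
  have h2 : (a + 1).toNat = a.toNat + 1 := by omega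
  simp [h2]

-- Two patched lines (a < b): the three slices around the two patches ARE the two indexed writes.
theorem patch_two (xs : List String) (a b : Int) (p q : String)
    (h0 : 0 ≤ a) (hab : a < b) (hb : b < (xs.length : Int)) :
    PySem.List.slice xs (some 0) (some a) ++ p ::
      (PySem.List.slice xs (some (a + 1)) (some b) ++ q :: PySem.List.slice xs (some (b + 1)) none)
      = (xs.set b.toNat q).set a.toNat p := by
  have ha1 : (a + 1).toNat = a.toNat + 1 := by omega
  have hb1 : (b + 1).toNat = b.toNat + 1 := by omega
  rw [PySem.List.slice_toNat xs le_rfl h0, PySem.List.slice_toNat xs (by omega) (by omega),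
    PySem.List.slice_from xs (by omega)]
  rw [List.set_eq_take_cons_drop p (by simp; omega)]
  rw [List.take_set, List.set_eq_of_length_le (by simp; omega)]
  rw [List.drop_set, if_neg (by omega)]
  rw [List.set_eq_take_cons_drop q (by simp; omega)]
  rw [List.drop_drop]
  have e1 : b.toNat - (a + 1).toNat = b.toNat - (a.toNat + 1) := by omega
  have e2 : b.toNat - (a.toNat + 1) + 1 + (a.toNat + 1) = b.toNat + 1 := by omega
  simp [ha1, hb1]
  omega

-- B's patch-dict fold equals the two guarded writes (generalized over the two patch strings).
theorem b_fold_eq (xs : List String) (ik iv : Int) (k v : String) :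
    (let p1 : PySem.Dict Int String :=
        if 0 ≤ iv ∧ iv < (xs.length : Int) then PySem.Dict.insert PySem.Dict.empty iv v else PySem.Dict.empty;
      let p2 : PySem.Dict Int String :=
        if 0 ≤ ik ∧ ik < (xs.length : Int) then PySem.Dict.insert p1 ik k else p1;
      let fin := (PySem.List.sorted (PySem.Dict.keys p2) (fun y => y) false).foldl
        (fun (st : List String × Int) i =>
          (st.1 ++ PySem.List.slice xs (some st.2) (some i) ++ [PySem.Dict.getD p2 i ""], i + 1))
        ([], (0 : Int));
      fin.1 ++ PySem.List.slice xs (some fin.2) none)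
    = (if 0 ≤ ik ∧ ik < (xs.length : Int) then
        (if 0 ≤ iv ∧ iv < (xs.length : Int) then xs.set iv.toNat v else xs).set ik.toNat k
      else if 0 ≤ iv ∧ iv < (xs.length : Int) then xs.set iv.toNat v else xs) := by
  by_cases hk : 0 ≤ ik ∧ ik < (xs.length : Int) <;>
    by_cases hv : 0 ≤ iv ∧ iv < (xs.length : Int) <;>
      simp only [hk, hv, and_self, if_true, if_false]
  · -- both in range
    by_cases he : ik = iv
    · subst he
      have hp : PySem.Dict.insert (PySem.Dict.insert (PySem.Dict.empty) ik v) ik k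
          = PySem.Dict.mk [(ik, k)] := by
        simp [PySem.Dict.insert, PySem.Dict.empty, PySem.Dict.contains]
      rw [hp]
      have hs : PySem.List.sorted (PySem.Dict.keys (PySem.Dict.mk [(ik, k)])) (fun y => y) false = [ik] := rfl
      rw [hs]
      simp only [List.foldl_cons, List.foldl_nil, List.nil_append]
      have hg : PySem.Dict.getD (PySem.Dict.mk [(ik, k)]) ik "" = k := by
        simp [PySem.Dict.getD, PySem.Dict.get?]
      rw [hg]
      simp only [List.append_assoc, List.singleton_append]
      rw [patch_one xs ik k hk.1 hk.2, List.set_set]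
    · have hp : PySem.Dict.insert (PySem.Dict.insert (PySem.Dict.empty) iv v) ik k
          = PySem.Dict.mk [(iv, v), (ik, k)] := by
        simp [PySem.Dict.insert, PySem.Dict.empty, PySem.Dict.contains,
          show iv ≠ ik from fun h => he h.symm]
      rw [hp]
      have hgv : PySem.Dict.getD (PySem.Dict.mk [(iv, v), (ik, k)]) iv "" = v := by
        simp [PySem.Dict.getD, PySem.Dict.get?]
      have hgk : PySem.Dict.getD (PySem.Dict.mk [(iv, v), (ik, k)]) ik "" = k := by
        simp [PySem.Dict.getD, PySem.Dict.get?, show iv ≠ ik from fun h => he h.symm]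
      rcases lt_or_gt_of_ne he with hlt | hgt
      · -- ik < iv : sorted keys = [ik, iv]
        have hs : PySem.List.sorted (PySem.Dict.keys (PySem.Dict.mk [(iv, v), (ik, k)])) (fun y => y) false
            = [ik, iv] := by
          exact PySem.List.sorted_eq_of_perm_of_pairwise_lt _ _ _ (List.Perm.swap _ _ _) (by simp [hlt])
        rw [hs]
        simp only [List.foldl_cons, List.foldl_nil, List.nil_append, hgv, hgk]
        simp only [List.append_assoc, List.cons_append, List.nil_append]
        rw [patch_two xs ik iv k v hk.1 hlt hv.2]
      · -- iv < ik : sorted keys = [iv, ik]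
        have hs : PySem.List.sorted (PySem.Dict.keys (PySem.Dict.mk [(iv, v), (ik, k)])) (fun y => y) false
            = [iv, ik] := by
          exact PySem.List.sorted_eq_of_perm_of_pairwise_lt _ _ _ (by rfl) (by simp [hgt])
        rw [hs]
        simp only [List.foldl_cons, List.foldl_nil, List.nil_append, hgv, hgk]
        simp only [List.append_assoc, List.cons_append, List.nil_append]
        rw [patch_two xs iv ik v k hv.1 hgt hk.2]
        exact (List.set_comm _ _ (by omega)).symm
  · -- only keys index in range
    have hs : PySem.List.sorted (PySem.Dict.keys
        (PySem.Dict.insert (PySem.Dict.empty) ik k)) (fun y => y) false = [ik] := rfl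
    rw [hs]
    simp only [List.foldl_cons, List.foldl_nil, List.nil_append]
    have hg : PySem.Dict.getD (PySem.Dict.insert (PySem.Dict.empty) ik k) ik "" = k := by
      simp [PySem.Dict.getD, PySem.Dict.get?, PySem.Dict.insert, PySem.Dict.empty, PySem.Dict.contains]
    rw [hg]
    simp only [List.append_assoc, List.singleton_append]
    exact patch_one xs ik k hk.1 hk.2
  · -- only values index in range
    have hs : PySem.List.sorted (PySem.Dict.keys
        (PySem.Dict.insert (PySem.Dict.empty) iv v)) (fun y => y) false = [iv] := rfl
    rw [hs]
    simp only [List.foldl_cons, List.foldl_nil, List.nil_append]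
    have hg : PySem.Dict.getD (PySem.Dict.insert (PySem.Dict.empty) iv v) iv "" = v := by
      simp [PySem.Dict.getD, PySem.Dict.get?, PySem.Dict.insert, PySem.Dict.empty, PySem.Dict.contains]
    rw [hg]
    simp only [List.append_assoc, List.singleton_append]
    exact patch_one xs iv v hv.1 hv.2
  · -- neither in range
    have hs : PySem.List.sorted (PySem.Dict.keys (PySem.Dict.empty : PySem.Dict Int String)) (fun y => y) false
        = ([] : List Int) := rfl
    rw [hs]
    simp only [List.foldl_nil, List.nil_append]
    rw [PySem.List.slice_from xs le_rfl]
    simp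

theorem update_ip_spec_aux (update_html_code : List String) (dt_ip : List (String × Int)) (indexs : List (String × List Int)) (hpre : Pre_update_ip update_html_code dt_ip indexs) :
    update_ip update_html_code dt_ip indexs = update_ip_alt update_html_code dt_ip indexs := by
  unfold Pre_update_ip at hpre
  unfold update_ip update_ip_alt
  cases hget : (PySem.Dict.ofList indexs).get? "ips" with
  | none => simp [hget] at hpre
  | some l =>
    rw [hget] at hpre
    match l with
    | [] => simp at hpre
    | [x] => simp at hpre
    | ik :: iv :: rest =>
      have h0 : PySem.List.pyGet? (ik :: iv :: rest) (0 : Int) = some ik := by simp [pysem]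
      have h1 : PySem.List.pyGet? (ik :: iv :: rest) (1 : Int) = some iv := by simp [pysem]
      simp only [h0, h1, Option.getD_some, List.getD_cons_zero, List.getD_cons_succ]
      rw [if_pos (show (2:Nat) ≤ (ik :: iv :: rest).length by simp)]
      -- A side: turn the fold into a map, then into the two guarded writes
      have hbody : (fun (updated_list : List String) (i : Int) =>
          if (i == ik) = true then
            updated_list ++ [String.ofList (PySem.List.slice (PySem.List.pyGetD update_html_code i "").toList (some 0) (some (PySem.Str.find (PySem.List.pyGetD update_html_code i "") ":" + 1))) ++ (" " ++ PySem.Str.replace (pyStrStrList (PySem.Dict.ofList dt_ip).keys) "\"" "") ++ ","]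
          else if (i == iv) = true then
            updated_list ++ [String.ofList (PySem.List.slice (PySem.List.pyGetD update_html_code i "").toList (some 0) (some (PySem.Str.find (PySem.List.pyGetD update_html_code i "") ":" + 1))) ++ pyStrIntList (PySem.Dict.ofList dt_ip).values ++ ","]
          else updated_list ++ [PySem.List.pyGetD update_html_code i ""])
          = (fun (updated_list : List String) (i : Int) => updated_list ++
            [if (i == ik) = true then
              String.ofList (PySem.List.slice (PySem.List.pyGetD update_html_code i "").toList (some 0) (some (PySem.Str.find (PySem.List.pyGetD update_html_code i "") ":" + 1))) ++ (" " ++ PySem.Str.replace (pyStrStrList (PySem.Dict.ofList dt_ip).keys) "\"" "") ++ ","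
            else if (i == iv) = true then
              String.ofList (PySem.List.slice (PySem.List.pyGetD update_html_code i "").toList (some 0) (some (PySem.Str.find (PySem.List.pyGetD update_html_code i "") ":" + 1))) ++ pyStrIntList (PySem.Dict.ofList dt_ip).values ++ ","
            else PySem.List.pyGetD update_html_code i ""]) := by
        funext acc i; split_ifs <;> rfl
      rw [hbody]
      rw [PySem.List.foldl_append_singleton_eq_map, List.nil_append,
        PySem.List.pyRange_zero_nat]
      rw [List.map_map]
      have hA := rebuild_eq update_html_code ik iv
        (fun s => String.ofList (PySem.List.slice s.toList (some 0) (some (PySem.Str.find s ":" + 1)))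
          ++ (" " ++ PySem.Str.replace (pyStrStrList (PySem.Dict.keys (PySem.Dict.ofList dt_ip))) "\"" "") ++ ",")
        (fun s => String.ofList (PySem.List.slice s.toList (some 0) (some (PySem.Str.find s ":" + 1)))
          ++ pyStrIntList (PySem.Dict.values (PySem.Dict.ofList dt_ip)) ++ ",")
      -- B side
      have hB := b_fold_eq update_html_code ik iv
        (lineHead (PySem.List.pyGetD update_html_code ik "") ++ " " ++ PySem.Str.replace (pyStrStrList (PySem.Dict.keys (PySem.Dict.ofList dt_ip))) "\"" "" ++ ",")
        (lineHead (PySem.List.pyGetD update_html_code iv "") ++ pyStrIntList (PySem.Dict.values (PySem.Dict.ofList dt_ip)) ++ ",")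
      simp only at hB
      rw [hB]
      exact hA.trans (by
        unfold patchTarget
        simp [lineHead, String.append_assoc])

-- ===== VERDICT (by name: the statement is the Claim_ definition above) =====
theorem update_ip_spec : Claim_equal_update_ip := by
  intro uhc dt idx _ hpre
  unfold Spec_update_ip
  exact update_ip_spec_aux uhc dt idx hpre
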